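-- pv_equiv track=rewrite | github.com/Mr-Moody/Tracking-For-Spotify | backend/util.py | sanitise
-- ===== SOURCE A (Python) =====
-- def sanitise(text:str) -> dict:
--     """
--     Returns a dictionary{"text":sanitised text, "invalid":the invalid text located}
--     """
--     BLOCKED_CHARACTERS = ["'", '"', "\\", "/"]
--     invalid = ""
--
--     for index,character in enumerate(text):
--         if character in BLOCKED_CHARACTERS:
--             invalid = character
--             text = text[:index] + text[index + 1:] #removes character from string
--
--     return {"text":text, "invalid":invalid}
-- ===== SOURCE B (Python) =====
-- def sanitise(text:str) -> dict:
--     """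
--     Returns a dictionary{"text":sanitised text, "invalid":the invalid text located}
--     """
--     BLOCKED_CHARACTERS = ["'", '"', "\\", "/"]
--     blocked = [c for c in text if c in BLOCKED_CHARACTERS]
--     cleaned = "".join(c for c in text if c not in BLOCKED_CHARACTERS)
--     return {"text": cleaned, "invalid": blocked[-1] if blocked else ""}
-- ===== Notes on version B (the rewrite author's own statement) =====
-- stated objective: simpler
-- what changed: A repeatedly rebuilds the string by slicing at the loop index of the original string while the string shrinks; B simply filters out the blocked characters in one pass and takes the last blocked character as 'invalid'.
-- intended difference: On texts containing two or more blocked characters A's loop index drifts after the first deletion, so A deletes wrong positions and returns a text that still contains blocked characters, while B removes every blocked character, which is the intended sanitisation; the last blocked character recorded is the same in both. — e.g. on sanitise("''"): A returns [("text", "'"), ("invalid", "'")], B returns [("text", ""), ("invalid", "'")]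
import Mathlib
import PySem

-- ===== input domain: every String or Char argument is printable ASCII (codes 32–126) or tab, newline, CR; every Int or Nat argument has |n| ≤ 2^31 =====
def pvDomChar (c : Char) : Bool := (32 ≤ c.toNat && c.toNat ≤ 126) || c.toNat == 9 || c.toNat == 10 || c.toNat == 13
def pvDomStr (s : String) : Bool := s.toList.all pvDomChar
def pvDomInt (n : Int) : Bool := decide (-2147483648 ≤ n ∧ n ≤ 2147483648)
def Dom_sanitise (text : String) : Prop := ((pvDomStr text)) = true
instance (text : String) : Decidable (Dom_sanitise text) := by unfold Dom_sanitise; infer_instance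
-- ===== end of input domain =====

-- B filters out the blocked characters in one pass (and takes the last blocked one as "invalid")
-- instead of A's repeated slice-and-rebuild at the stale loop index; on texts with ≥ 2 blocked
-- characters A's index drifts and the values differ (see D_sanitise below).

-- ===== PORT A =====
-- BLOCKED_CHARACTERS membership test (a list of one-character strings in Python; the loop tests one character)
def pvBlocked (c : Char) : Bool := c ∈ ['\'', '"', '\\', '/']

-- one iteration of A's loop: state (text, invalid), pair (index, character) from enumerate of the ORIGINAL text
def pvStepA (st : List Char × List Char) (p : Int × Char) : List Char × List Char :=
  if pvBlocked p.2 then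
    (PySem.List.slice st.1 none (some p.1) ++ PySem.List.slice st.1 (some (p.1 + 1)) none, [p.2])
  else st

def sanitise (text : String) : List (String × String) :=
  let r := (PySem.List.enumerate text.toList).foldl pvStepA (text.toList, [])
  [("text", String.ofList r.1), ("invalid", String.ofList r.2)]

-- ===== PORT B =====
def sanitise_alt (text : String) : List (String × String) :=
  let blocked := text.toList.filter pvBlocked
  let cleaned := text.toList.filter (fun c => !pvBlocked c)
  [("text", String.ofList cleaned),
   ("invalid", String.ofList (match blocked.getLast? with | some c => [c] | none => []))]

-- ===== PRECONDITION & SPEC =====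
-- On texts with ≥ 2 blocked characters A's loop index drifts after the first deletion, so A returns a
-- text still containing blocked characters, while B removes all of them — the intended sanitisation.
def D_sanitise (text : String) : Prop := 2 ≤ text.toList.countP pvBlocked
instance (text : String) : Decidable (D_sanitise text) := by unfold D_sanitise; infer_instance

def Spec_sanitise (text : String) (out : List (String × String)) : Prop := ¬ D_sanitise text → out = sanitise_alt text
instance (text : String) (out : List (String × String)) : Decidable (Spec_sanitise text out) := by unfold Spec_sanitise; infer_instance

def pvDiffWitness_sanitise : String := "''"
def pvDiffWitnessOut_sanitise : (List (String × String)) × (List (String × String)) :=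
  ([("text", "'"), ("invalid", "'")], [("text", ""), ("invalid", "'")])

-- ===== CLAIM (what is proved, stated in full; the proofs are below) =====
def Claim_unchanged_sanitise : Prop := ∀ (text : String), Dom_sanitise text → Spec_sanitise text (sanitise text)
def Claim_changed_sanitise : Prop := Dom_sanitise (pvDiffWitness_sanitise) ∧ D_sanitise (pvDiffWitness_sanitise) ∧ sanitise (pvDiffWitness_sanitise) = pvDiffWitnessOut_sanitise.1 ∧ sanitise_alt (pvDiffWitness_sanitise) = pvDiffWitnessOut_sanitise.2 ∧ pvDiffWitnessOut_sanitise.1 ≠ pvDiffWitnessOut_sanitise.2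

-- ===== LEMMAS AND PROOFS =====

-- the "invalid" accumulator alone: last blocked character of l, else inv
def pvLastB (l : List Char) (inv : List Char) : List Char :=
  match l with
  | [] => inv
  | c :: t => pvLastB t (if pvBlocked c then [c] else inv)

-- A's step with a Nat loop index, slices resolved to take/drop
lemma pvStepA_nat (cur inv : List Char) (s : Nat) (c : Char) :
    pvStepA (cur, inv) ((s : Int), c)
      = if pvBlocked c then (cur.take s ++ cur.drop (s + 1), [c]) else (cur, inv) := by
  simp only [pvStepA]
  by_cases hb : pvBlocked c
  · simp only [hb, if_true]
    rw [PySem.List.slice_to_natCast,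
        show (s : Int) + 1 = ((s + 1 : Nat) : Int) by push_cast; ring,
        PySem.List.slice_from_natCast]
  · simp [hb]

-- a block with no blocked characters leaves A's state unchanged
lemma pvA_skip (l : List Char) : ∀ (s : Nat) (cur inv : List Char),
    l.countP pvBlocked = 0 →
    (PySem.List.enumerate l (s : Int)).foldl pvStepA (cur, inv) = (cur, inv) := by
  induction l with
  | nil => intro s cur inv _; simp [PySem.List.enumerate_nil]
  | cons c t ih =>
    intro s cur inv h
    simp only [List.countP_cons] at h
    have hb : pvBlocked c = false := by
      by_cases hb : pvBlocked c
      · simp [hb] at h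
      · simpa using hb
    rw [PySem.List.enumerate_cons, List.foldl_cons, pvStepA_nat, if_neg (by simp [hb]),
        show (s : Int) + 1 = ((s + 1 : Nat) : Int) by push_cast; ring,
        ih (s + 1) cur inv (by omega)]

lemma pvLastB_no (l : List Char) : ∀ inv, l.countP pvBlocked = 0 → pvLastB l inv = inv := by
  induction l with
  | nil => intro inv _; rfl
  | cons c t ih =>
    intro inv h
    simp only [List.countP_cons] at h
    have hb : pvBlocked c = false := by
      by_cases hb : pvBlocked c
      · simp [hb] at h
      · simpa using hb
    simp only [pvLastB, hb, Bool.false_eq_true, if_false]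
    exact ih inv (by omega)

lemma pvFilter_no (l : List Char) (h : l.countP pvBlocked = 0) :
    l.filter (fun c => !pvBlocked c) = l := by
  rw [List.filter_eq_self]
  intro a ha
  have := List.countP_eq_zero.mp h a ha
  simpa using this

-- Main: with at most one blocked character A's fold is the filter, with pvLastB as the invalid
lemma pvMain (l : List Char) : ∀ (pre inv : List Char), l.countP pvBlocked ≤ 1 →
    (PySem.List.enumerate l (pre.length : Int)).foldl pvStepA (pre ++ l, inv)
      = (pre ++ l.filter (fun c => !pvBlocked c), pvLastB l inv) := by
  induction l with
  | nil => intro pre inv _; simp [PySem.List.enumerate_nil, pvLastB]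
  | cons c t ih =>
    intro pre inv h
    rw [PySem.List.enumerate_cons, List.foldl_cons, pvStepA_nat,
        show (pre.length : Int) + 1 = (((pre ++ [c]).length : Nat) : Int) by simp]
    by_cases hb : pvBlocked c
    · rw [if_pos hb]
      have ht : t.countP pvBlocked = 0 := by
        simp only [List.countP_cons, hb, if_pos] at h; omega
      have htake : (pre ++ c :: t).take pre.length = pre := List.take_left' rfl
      have hdrop : (pre ++ c :: t).drop (pre.length + 1) = t := by
        rw [show pre.length + 1 = (pre ++ [c]).length by simp,
            show pre ++ c :: t = (pre ++ [c]) ++ t by simp, List.drop_left]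
      rw [htake, hdrop, pvA_skip t (pre ++ [c]).length (pre ++ t) [c] ht]
      simp [pvLastB, hb, pvLastB_no t [c] ht, pvFilter_no t ht]
    · rw [if_neg hb]
      have hb' : pvBlocked c = false := by simpa using hb
      have ht : t.countP pvBlocked ≤ 1 := by
        simp only [List.countP_cons, hb', Bool.false_eq_true, if_false] at h; omega
      have hih := ih (pre ++ [c]) inv ht
      simp only [List.append_assoc, List.singleton_append] at hih
      rw [hih]
      simp [pvLastB, hb']

lemma pvLastB_getLast (l : List Char) : ∀ inv,
    pvLastB l inv = (match (l.filter pvBlocked).getLast? with | some c => [c] | none => inv) := by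
  induction l with
  | nil => intro inv; rfl
  | cons c t ih =>
    intro inv
    by_cases hb : pvBlocked c
    · simp only [pvLastB, hb, if_pos, List.filter_cons]
      rw [ih [c]]
      cases h : t.filter pvBlocked with
      | nil => simp
      | cons e r =>
        rcases hg : (e :: r).getLast? with _ | d
        · exact absurd (List.getLast?_eq_none_iff.mp hg) (by simp)
        · simp [List.getLast?_cons_cons, hg]
    · have hb' : pvBlocked c = false := by simpa using hb
      simp only [pvLastB, hb', Bool.false_eq_true, if_false, List.filter_cons, ih inv]

-- ===== VERDICT (by name: the statements are the Claim_ definitions above) =====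
theorem sanitise_spec : Claim_unchanged_sanitise := by
  intro text _ hnD
  unfold D_sanitise at hnD
  have h1 : text.toList.countP pvBlocked ≤ 1 := by omega
  unfold sanitise sanitise_alt
  have h := pvMain text.toList [] [] h1
  simp only [List.length_nil, Nat.cast_zero, List.nil_append] at h
  rw [h, pvLastB_getLast]

theorem sanitise_changed : Claim_changed_sanitise := by
  unfold Claim_changed_sanitise; decide
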